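-- pv_equiv track=rewrite | github.com/r0hitrai/HackerEarth-Solutions | Practice/Basic Programming/Basics of Implementation/py/MathematicallyBeautifulNumbers.py | nearestSum
-- ===== SOURCE A (Python) =====
-- def nearestSum(number, value, power):
-- 	# if value power is more than number, then don't go further
-- 	if power > number:
-- 		return 0
-- 	# if value power is less than or equal to number, then go to next power
-- 	else:
-- 		totalSum = nearestSum(number, value, power * value); # calling itself with next power
-- 	# if next sum becomes more than number, then return sum without adding
-- 	if (totalSum + power) > number:
-- 		return totalSum
-- 	# if next sum becomes less than or equal to number, then return next sum
-- 	else: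
-- 		totalSum += power
-- 		return totalSum
-- ===== SOURCE B (Python) =====
-- def nearestSum(number, value, power):
--     # count how many successive powers fit under number, then add them
--     # largest-first by recomputing each power with exponentiation
--     k = 0
--     cur = power
--     while cur <= number:
--         cur *= value
--         k += 1
--     totalSum = 0
--     for i in range(k - 1, -1, -1):
--         p = power * value ** i
--         if totalSum + p <= number:
--             totalSum += p
--     return totalSum
-- ===== Notes on version B (the rewrite author's own statement) =====
-- stated objective: alternative
-- what changed: Replaces A's unbounded recursion (unwind to the largest power, add on the way back) by two independent loops: first a counting while loop that only finds how many successive powers fit, then a downward for loop over exponents that recomputes each power as power*value**i and adds it greedily.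
import Mathlib
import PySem

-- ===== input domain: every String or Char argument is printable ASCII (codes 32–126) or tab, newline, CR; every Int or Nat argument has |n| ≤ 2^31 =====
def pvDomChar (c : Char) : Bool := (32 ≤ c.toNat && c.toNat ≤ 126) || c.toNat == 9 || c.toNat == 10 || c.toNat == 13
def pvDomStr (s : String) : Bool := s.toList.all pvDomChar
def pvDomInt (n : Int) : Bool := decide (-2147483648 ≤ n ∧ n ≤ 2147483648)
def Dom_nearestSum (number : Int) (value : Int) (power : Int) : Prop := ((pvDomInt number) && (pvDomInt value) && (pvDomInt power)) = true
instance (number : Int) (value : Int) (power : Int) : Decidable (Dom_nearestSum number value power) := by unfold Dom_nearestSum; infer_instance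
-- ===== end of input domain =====

-- B replaces A's recursion by a count-then-recompute iteration: count how many successive powers fit, then add them largest-first recomputing each as power*value^i; equal return values proved on Pre_ (objective: alternative decomposition, not faster).

-- ===== PORT A =====
-- A's unbounded recursion, made total with fuel; 200 exceeds the recursion
-- depth on every input admitted by Pre_ within Dom (depth ≤ ~70 there).
def nearestSumFuel (fuel : Nat) (number : Int) (value : Int) (power : Int) : Int :=
  match fuel with
  | 0 => 0
  | f + 1 =>
    if power > number then 0
    else
      let totalSum := nearestSumFuel f number value (power * value)
      if totalSum + power > number then totalSum else totalSum + power

def nearestSum (number : Int) (value : Int) (power : Int) : Int :=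
  nearestSumFuel 200 number value power

-- ===== PORT B =====
-- B's first while loop (count how many successive powers fit), with the same fuel bound.
def countFit (fuel : Nat) (number : Int) (value : Int) (cur : Int) (k : Int) : Int :=
  match fuel with
  | 0 => k
  | f + 1 => if cur ≤ number then countFit f number value (cur * value) (k + 1) else k

-- B's second loop: for i in range(k-1, -1, -1): recompute p = power * value**i, add greedily.
def nearestSum_alt (number : Int) (value : Int) (power : Int) : Int :=
  let k := countFit 200 number value power 0
  (PySem.List.pyRange (k - 1) (-1) (-1)).foldl
    (fun totalSum i =>
      let p := power * value ^ i.toNat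
      if totalSum + p ≤ number then totalSum + p else totalSum) 0

-- ===== PRECONDITION & SPEC =====
-- Pre_ admits exactly the inputs on which A's recursion terminates; everywhere
-- else the chain power, power*value, … never exceeds number and A raises
-- RecursionError (and B's while loop would not terminate either).
def Pre_nearestSum (number : Int) (value : Int) (power : Int) : Prop :=
  number < power ∨ (1 ≤ power ∧ 2 ≤ value) ∨ (power ≠ 0 ∧ value ≤ -2) ∨
    (value = 0 ∧ number < 0) ∨ (value = -1 ∧ number < -power)
instance (number : Int) (value : Int) (power : Int) : Decidable (Pre_nearestSum number value power) := by
  unfold Pre_nearestSum; infer_instance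

def pvWitness_nearestSum : Int × Int × Int := (10, 2, 1)

def Spec_nearestSum (number : Int) (value : Int) (power : Int) (out : Int) : Prop := out = nearestSum_alt number value power
instance (number : Int) (value : Int) (power : Int) (out : Int) : Decidable (Spec_nearestSum number value power out) := by unfold Spec_nearestSum; infer_instance

-- ===== CLAIM (what is proved, stated in full; the proofs are below) =====
def Claim_equal_nearestSum : Prop := ∀ (number : Int) (value : Int) (power : Int), Dom_nearestSum number value power → Pre_nearestSum number value power → Spec_nearestSum number value power (nearestSum number value power)

-- ===== LEMMAS AND PROOFS =====

-- Proof-only: the length of the chain of fitting powers, as the recursion sees it.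
def chainLen (fuel : Nat) (number : Int) (value : Int) (power : Int) : Nat :=
  match fuel with
  | 0 => 0
  | f + 1 => if power ≤ number then chainLen f number value (power * value) + 1 else 0

theorem countFit_eq_chainLen (f : Nat) (n v : Int) : ∀ p k : Int,
    countFit f n v p k = k + (chainLen f n v p : Int) := by
  induction f with
  | zero => intro p k; simp [countFit, chainLen]
  | succ f ih =>
    intro p k
    by_cases h : p ≤ n
    · simp only [countFit, chainLen, if_pos h, ih]; push_cast; ring
    · simp [countFit, chainLen, h]

theorem range_reverse_eq_map (n : Nat) :
    (List.range n).reverse = (List.range n).map (fun j => n - 1 - j) := by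
  induction n with
  | zero => simp
  | succ n ih =>
    have h1 : (List.range (n + 1)).reverse = n :: (List.range n).reverse := by
      rw [List.range_succ]; simp
    rw [h1, ih]
    conv_rhs => rw [List.range_succ_eq_map]
    simp only [List.map_cons, List.map_map]
    refine congrArg₂ _ (by omega) ?_
    refine List.map_congr_left (fun j _ => ?_)
    simp only [Function.comp_apply]; omega

-- Unwinding A's recursion adds the fitting powers largest-first: it equals the
-- greedy left fold over [p·v^(L-1), …, p·v^0] where L is the chain length.
theorem nearestSumFuel_eq_fold (f : Nat) (n v : Int) : ∀ p : Int,
    nearestSumFuel f n v p =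
      ((List.range (chainLen f n v p)).reverse.map (fun i => p * v ^ i)).foldl
        (fun t q => if t + q ≤ n then t + q else t) 0 := by
  induction f with
  | zero => intro p; simp [nearestSumFuel, chainLen]
  | succ f ih =>
    intro p
    by_cases h : p > n
    · simp [nearestSumFuel, chainLen, h, not_le.mpr h]
    · have h' : p ≤ n := not_lt.mp h
      have hchain : chainLen (f + 1) n v p = chainLen f n v (p * v) + 1 := by
        simp [chainLen, h']
      have hlist : (List.range (chainLen f n v (p * v) + 1)).reverse.map (fun i => p * v ^ i)
          = ((List.range (chainLen f n v (p * v))).reverse.map (fun i => p * v * v ^ i)) ++ [p] := by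
        rw [List.range_succ_eq_map, List.reverse_cons, List.map_append, List.map_reverse,
          List.map_reverse, List.map_map]
        refine congrArg₂ _ (congrArg _ (List.map_congr_left fun j _ => ?_)) (by simp)
        simp only [Function.comp_apply, pow_succ]; ring
      rw [hchain, hlist]
      simp only [nearestSumFuel, if_neg h, List.foldl_append, List.foldl_cons, List.foldl_nil]
      rw [ih (p * v)]
      split_ifs <;> omega

-- B's second loop is the same greedy fold: range(k-1,-1,-1) enumerates the
-- exponents L-1, …, 0 and p is recomputed as power * value^i.
theorem alt_eq_fold (n v p : Int) (L : Nat) :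
    (PySem.List.pyRange ((L : Int) - 1) (-1) (-1)).foldl
      (fun t i => let q := p * v ^ i.toNat; if t + q ≤ n then t + q else t) 0 =
    ((List.range L).reverse.map (fun i => p * v ^ i)).foldl
      (fun t q => if t + q ≤ n then t + q else t) 0 := by
  rw [PySem.List.pyRange_neg_one, range_reverse_eq_map,
    show ((L : Int) - 1 - -1).toNat = L from by omega, List.map_map,
    List.foldl_map, List.foldl_map]
  refine List.foldl_ext _ _ _ (fun t j hj => ?_)
  have hjL : j < L := List.mem_range.mp hj
  have h2 : ((L : Int) - 1 - (j : Int)).toNat = L - 1 - j := by omega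
  simp only [Function.comp_apply, h2]

-- ===== VERDICT (by name: the statement is the Claim_ definition above) =====
theorem nearestSum_spec : Claim_equal_nearestSum := by
  intro number value power _ _
  unfold Spec_nearestSum nearestSum nearestSum_alt
  rw [countFit_eq_chainLen 200 number value power 0]
  simp only [zero_add]
  rw [alt_eq_fold number value power (chainLen 200 number value power)]
  exact nearestSumFuel_eq_fold 200 number value power
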